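-- pv_equiv track=rewrite | github.com/ryanlane/document-manager | backend/src/enrich/enrich_entries.py | extract_category_from_path
-- ===== SOURCE A (Python) =====
-- CATEGORY_FOLDERS = ['scifi', 'sci-fi', 'fantasy', 'romance', 'horror', 'mystery',
--                     'thriller', 'drama', 'comedy', 'adventure', 'historical',
--                     'erotica', 'fiction', 'nonfiction', 'poetry', 'essay']
--
-- def extract_category_from_path(path: str) -> str:
--     """Extract category/genre from folder structure."""
--     path = path.replace('\\', '/').lower()
--     path_parts = path.split('/')
--
--     for part in path_parts:
--         if part in CATEGORY_FOLDERS: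
--             return part.title()
--
--     # Also check for patterns like "stories/category_name/"
--     for i, part in enumerate(path_parts):
--         if part in ['stories', 'story', 'docs', 'archive'] and i + 1 < len(path_parts):
--             candidate = path_parts[i + 1]
--             if candidate not in ['authors', 'files', 'data'] and len(candidate) > 2:
--                 return candidate.title()
--
--     return None
-- ===== SOURCE B (Python) =====
-- CATEGORY_FOLDERS = ['scifi', 'sci-fi', 'fantasy', 'romance', 'horror', 'mystery',
--                     'thriller', 'drama', 'comedy', 'adventure', 'historical',
--                     'erotica', 'fiction', 'nonfiction', 'poetry', 'essay']
--
-- _CATS = frozenset(CATEGORY_FOLDERS)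
-- _MARKERS = frozenset(['stories', 'story', 'docs', 'archive'])
-- _SKIP = frozenset(['authors', 'files', 'data'])
--
--
-- def extract_category_from_path(path: str) -> str:
--     """Single pass: return a category part at once; remember the first
--     marker's valid successor as a fallback and return it after the scan."""
--     parts = path.replace('\\', '/').lower().split('/')
--     fallback = None
--     for i, part in enumerate(parts):
--         if part in _CATS:
--             return part.title()
--         if fallback is None and part in _MARKERS and i + 1 < len(parts):
--             nxt = parts[i + 1]
--             if nxt not in _SKIP and len(nxt) > 2:
--                 fallback = nxt.title()
--     return fallback
-- ===== Notes on version B (the rewrite author's own statement) =====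
-- stated objective: alternative
-- what changed: Replaces A's two sequential scans (one for category folders, one indexed scan for marker/candidate pairs) by a single pass that returns a category immediately and records the first valid marker successor as a pending fallback returned after the loop.
import Mathlib
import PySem

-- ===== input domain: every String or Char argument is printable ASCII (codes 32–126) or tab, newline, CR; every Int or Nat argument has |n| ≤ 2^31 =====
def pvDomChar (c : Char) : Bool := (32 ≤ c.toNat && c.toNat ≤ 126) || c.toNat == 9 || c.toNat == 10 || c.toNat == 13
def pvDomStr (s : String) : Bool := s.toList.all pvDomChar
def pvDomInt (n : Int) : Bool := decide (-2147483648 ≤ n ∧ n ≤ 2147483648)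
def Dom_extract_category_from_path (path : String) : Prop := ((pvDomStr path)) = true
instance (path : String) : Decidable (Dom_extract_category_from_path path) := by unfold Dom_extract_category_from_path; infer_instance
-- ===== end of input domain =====

-- B merges A's two sequential scans into one pass with a pending fallback; alternative decomposition, same cost.

-- shared primitive: Python str.title() on ASCII (uppercase a letter after a non-letter, lowercase otherwise)
def pvTitleGo : List Char → Bool → List Char
  | [], _ => []
  | c :: rest, prev =>
    if PySem.Chars.isalpha c then
      (if prev then PySem.Chars.lowerChar c else PySem.Chars.upperChar c) :: pvTitleGo rest true
    else c :: pvTitleGo rest false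

def pvTitle (p : List Char) : String := String.ofList (pvTitleGo p false)

def pvCategoryFolders : List (List Char) :=
  ["scifi".toList, "sci-fi".toList, "fantasy".toList, "romance".toList, "horror".toList,
   "mystery".toList, "thriller".toList, "drama".toList, "comedy".toList, "adventure".toList,
   "historical".toList, "erotica".toList, "fiction".toList, "nonfiction".toList,
   "poetry".toList, "essay".toList]

def pvMarkers : List (List Char) := ["stories".toList, "story".toList, "docs".toList, "archive".toList]

def pvSkip : List (List Char) := ["authors".toList, "files".toList, "data".toList]

def pvParts (path : String) : List (List Char) :=
  PySem.Chars.splitOn (PySem.Chars.lower (PySem.Chars.replace path.toList ['\\'] ['/'])) ['/']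

-- ===== PORT A =====
-- first loop: return the first part that is a category folder
def pvLoop1 : List (List Char) → Option (List Char)
  | [] => none
  | p :: rest => if p ∈ pvCategoryFolders then some p else pvLoop1 rest

-- second loop: parts[i+1] is the head of the remaining list; i+1 < len ↔ that list is nonempty
def pvLoop2 : List (List Char) → Option (List Char)
  | [] => none
  | p :: rest =>
    if p ∈ pvMarkers then
      match rest with
      | [] => pvLoop2 rest
      | c :: _ => if c ∉ pvSkip ∧ c.length > 2 then some c else pvLoop2 rest
    else pvLoop2 rest

def extract_category_from_path (path : String) : Option String :=
  let parts := pvParts path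
  match pvLoop1 parts with
  | some p => some (pvTitle p)
  | none => (pvLoop2 parts).map pvTitle

-- ===== PORT B =====
-- single pass with a pending fallback
-- fallback update for one step of B's loop (parts[i+1] = head of the remaining list)
def pvStep (p : List Char) (rest : List (List Char)) (fb : Option String) : Option String :=
  if fb = none ∧ p ∈ pvMarkers then
    match rest with
    | [] => fb
    | c :: _ => if c ∉ pvSkip ∧ c.length > 2 then some (pvTitle c) else fb
  else fb

def pvGoB : List (List Char) → Option String → Option String
  | [], fb => fb
  | p :: rest, fb =>
    if p ∈ pvCategoryFolders then some (pvTitle p)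
    else pvGoB rest (pvStep p rest fb)

def extract_category_from_path_alt (path : String) : Option String :=
  pvGoB (pvParts path) none

-- ===== PRECONDITION & SPEC =====
def Spec_extract_category_from_path (path : String) (out : Option String) : Prop := out = extract_category_from_path_alt path
instance (path : String) (out : Option String) : Decidable (Spec_extract_category_from_path path out) := by unfold Spec_extract_category_from_path; infer_instance

-- ===== CLAIM (what is proved, stated in full; the proofs are below) =====
def Claim_equal_extract_category_from_path : Prop := ∀ (path : String), Dom_extract_category_from_path path → Spec_extract_category_from_path path (extract_category_from_path path)

-- ===== LEMMAS AND PROOFS =====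
lemma pvGoB_eq (parts : List (List Char)) : ∀ fb : Option String,
    pvGoB parts fb =
      match pvLoop1 parts with
      | some p => some (pvTitle p)
      | none => match fb with
                | some v => some v
                | none => (pvLoop2 parts).map pvTitle := by
  induction parts with
  | nil => intro fb; cases fb <;> simp [pvGoB, pvLoop1, pvLoop2]
  | cons p rest ih =>
    intro fb
    by_cases hc : p ∈ pvCategoryFolders
    · simp [pvGoB, pvLoop1, hc]
    · have h1 : pvLoop1 (p :: rest) = pvLoop1 rest := by simp [pvLoop1, hc]
      rw [show pvGoB (p :: rest) fb = pvGoB rest (pvStep p rest fb) from by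
            simp [pvGoB, hc], ih, h1]
      cases hl : pvLoop1 rest with
      | some q => simp
      | none =>
        cases fb with
        | some v => simp [pvStep]
        | none =>
          by_cases hm : p ∈ pvMarkers
          · cases rest with
            | nil => simp [pvLoop2, pvStep, hm]
            | cons c cs =>
              by_cases hpass : c ∉ pvSkip ∧ c.length > 2
              · simp [pvLoop2, pvStep, hm, hpass]
              · simp [pvLoop2, pvStep, hm, hpass]
          · simp [pvLoop2, pvStep, hm]

-- ===== VERDICT (by name: the statement is the Claim_ definition above) =====
theorem extract_category_from_path_spec : Claim_equal_extract_category_from_path := by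
  intro path _
  unfold Spec_extract_category_from_path extract_category_from_path extract_category_from_path_alt
  rw [pvGoB_eq]
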